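-- pv_equiv track=rewrite | github.com/snow-0420/CSC384-A2 | puzzle_csp.py | cage_subtraction
-- ===== SOURCE A (Python) =====
-- def cage_subtraction(lst, target):
--     for i in range(len(lst)):
--         num = lst[i]
--         sub_lst = [-x for x in lst]
--         sub_lst[i] = num
--         if sum(sub_lst) == target:
--             return True
--     return False
-- ===== SOURCE B (Python) =====
-- def cage_subtraction(lst, target):
--     total = sum(lst)
--     return any(2 * x - total == target for x in lst)
-- ===== Notes on version B (the rewrite author's own statement) =====
-- stated objective: faster
-- what changed: Compute the total sum once and test 2*x-total==target in a single pass, instead of rebuilding and summing a negated copy of the list for every index.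
import Mathlib
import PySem

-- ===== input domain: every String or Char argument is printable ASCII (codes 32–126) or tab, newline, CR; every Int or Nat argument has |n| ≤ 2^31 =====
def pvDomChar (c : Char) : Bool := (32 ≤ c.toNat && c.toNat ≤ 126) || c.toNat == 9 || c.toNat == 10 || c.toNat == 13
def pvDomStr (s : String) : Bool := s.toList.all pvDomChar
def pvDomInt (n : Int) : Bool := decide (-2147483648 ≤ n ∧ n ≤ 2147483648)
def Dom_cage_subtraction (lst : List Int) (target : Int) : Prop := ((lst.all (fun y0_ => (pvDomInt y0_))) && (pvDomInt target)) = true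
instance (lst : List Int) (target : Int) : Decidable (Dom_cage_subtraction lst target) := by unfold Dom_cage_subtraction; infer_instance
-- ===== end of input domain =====

-- ===== PORT A =====
-- B computes the total sum once and checks 2*x-total==target in one pass (O(n) vs A's O(n^2)).
def cage_subtraction (lst : List Int) (target : Int) : Bool :=
  (List.range lst.length).any (fun i =>
    let num := lst.getD i 0
    let sub_lst := (lst.map (fun x => -x)).set i num
    sub_lst.sum == target)

-- ===== PORT B =====
def cage_subtraction_alt (lst : List Int) (target : Int) : Bool :=
  let total := lst.sum
  lst.any (fun x => 2 * x - total == target)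

-- ===== PRECONDITION & SPEC =====
def Spec_cage_subtraction (lst : List Int) (target : Int) (out : Bool) : Prop := out = cage_subtraction_alt lst target
instance (lst : List Int) (target : Int) (out : Bool) : Decidable (Spec_cage_subtraction lst target out) := by unfold Spec_cage_subtraction; infer_instance

-- ===== CLAIM (what is proved, stated in full; the proofs are below) =====
def Claim_equal_cage_subtraction : Prop := ∀ (lst : List Int) (target : Int), Dom_cage_subtraction lst target → Spec_cage_subtraction lst target (cage_subtraction lst target)

-- ===== LEMMAS AND PROOFS =====

-- ===== VERDICT (by name: the statement is the Claim_ definition above) =====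
-- sum of the elementwise-negated list
theorem sum_map_neg (l : List Int) : (l.map (fun x => -x)).sum = -l.sum := by
  induction l with
  | nil => simp
  | cons a t ih => simp [ih]; ring

-- sum of the negated list with position i restored equals 2*lst[i] - lst.sum
theorem sum_neg_set (lst : List Int) (i : Nat) (h : i < lst.length) :
    ((lst.map (fun x => -x)).set i (lst.getD i 0)).sum = 2 * lst.getD i 0 - lst.sum := by
  induction lst generalizing i with
  | nil => simp at h
  | cons a l ih =>
    cases i with
    | zero =>
      simp only [List.map_cons, List.set_cons_zero, List.getD_cons_zero, List.sum_cons,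
        sum_map_neg]
      ring
    | succ j =>
      simp only [List.map_cons, List.set_cons_succ, List.sum_cons, List.getD_cons_succ]
      rw [ih j (by simpa using h)]
      ring

-- congruence for List.any under pointwise equality on members
theorem any_congr_mem {α : Type} (l : List α) (p q : α → Bool)
    (h : ∀ a ∈ l, p a = q a) : l.any p = l.any q := by
  induction l with
  | nil => rfl
  | cons a t ih =>
    simp only [List.any_cons]
    rw [h a (by simp), ih (fun b hb => h b (by simp [hb]))]

-- 'any over indices' = 'any over elements'
theorem range_any_eq (lst : List Int) (p : Int → Bool) :
    (List.range lst.length).any (fun i => p (lst.getD i 0)) = lst.any p := by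
  induction lst with
  | nil => simp
  | cons a l ih =>
    rw [List.length_cons, List.range_succ_eq_map]
    simp only [List.any_cons, List.any_map, List.getD_cons_zero]
    rw [← ih]
    rfl

theorem cage_subtraction_spec : Claim_equal_cage_subtraction := by
  intro lst target _
  unfold Spec_cage_subtraction cage_subtraction cage_subtraction_alt
  simp only []
  have step : ∀ i ∈ List.range lst.length,
      (((lst.map (fun x => -x)).set i (lst.getD i 0)).sum == target)
        = ((fun x => 2 * x - lst.sum == target) (lst.getD i 0)) := by
    intro i hi
    simp only []
    rw [sum_neg_set lst i (List.mem_range.mp hi)]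
  calc ((List.range lst.length).any fun i =>
          ((lst.map (fun x => -x)).set i (lst.getD i 0)).sum == target)
      = (List.range lst.length).any
          (fun i => (fun x => 2 * x - lst.sum == target) (lst.getD i 0)) := by
        exact any_congr_mem _ _ _ step
    _ = lst.any (fun x => 2 * x - lst.sum == target) := range_any_eq lst (fun x => 2 * x - lst.sum == target)
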